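/-
  DO THE FOOTPRINTS OF THE STATEMENT LAYER GO THROUGH THE FRAME TACTICS?  (G's brief 3(c); S8's FINDING 1: a ghost definition with
  `%` / `/` of a register value inside a Spec's `writes` made `u_same` spend minutes in `whnf` on `Nat.mod` applied to a variable;
  S8's remedy: the ghost definition IRREDUCIBLE + its `_def` rewrite rule in the simp set `vspec`.)

  Every `writes` of every `Spec` of Vorbis/Spec/*.lean (102 Specs) was run through the real tactic of `v_returned`'s `same` field,
  `simp only [X86.User.Spec.footprint, vspec]; u_same`, on two goal shapes (tools: a `#footprint_test` command, one process per Spec,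
  120 s cap; the table is in G-6's report):
    WHOLE FUNCTION   Mem.SameExcept (spec.footprint u) u.mem ((u.mem.writeLE (u.reg .rsp - 8) 8 v).writeLE a 1 v), `a` inside a window
    SEGMENT          the footprint so far CARRIED as a hypothesis `Mem.SameExcept (spec.footprint u) u.mem w`, two more pushes over `w`
  RESULT: no hang. Every footprint that `vspec` turns into a LITERAL list closes in 0.2 – 4.2 s (the slowest: init_blocksize, 11
  windows). This file keeps ONE example per KIND of construct, so that a later change of a Spec or of the tactics that breaks one
  shows at `lake build`:

      inline `(u.reg r).toNat % 2 ^ 32` inside `Asan.shadowSpan`                       setup_malloc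
      `Vorbis.r8 (… % 2 ^ 32)` (a ghost `def` with `/` and `*`) inside `shadowSpan`       setup_temp_malloc
      `(argInt r).toNat`  (`argInt` an `abbrev` of `sint32 (… % 2 ^ 32)`)                 getn
      `argU32 r`, `decodeLen …`, `stepBytes …` (opaque ghost functions of the memory)    residue_decode, codebook_decode_step
      `(s32 r).toNat`, `(min (s32 r) (s32 r')).toNat`, `(s32 r / 2).toNat`, `s64`          draw_line, do_floor, copy_frame
      `arg32 u r` / `quarter u` (S8: irreducible + `_def` in `vspec`)                     imdct_step3_iter0_loop
      `if sparse … then … else …`                                                      add_entry (both cases)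
      `… ++ (List.range n).map …` (NOT a literal list after `vspec`)                     decode_residue (segment shape)

  WHAT DOES NOT CLOSE BY ITSELF (it FAILS at once with "the memory is not a nest of stores …"; it does not hang):
    * the `if` footprints (add_entry, compute_codewords, compute_sorted_huffman): give the case to the simp call,
      `simp only [X86.User.Spec.footprint, vspec, if_pos h]` (or `rw` S3's per-case lemma `….spec_writes_dense / _sparse`);
    * the footprints that are not literal lists (`DecodeResidue.writes`, `vorbis_decode_packet_rest.writes`, `StartDecoder.writes`,
      `deint.wins`, `compute_sorted_huffman.wins`): all belong to SEGMENTED functions, whose `Returned.same` is the `same` field of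
      the last segment's entry assertion (no walk-level `u_same` over the whole list is ever needed); stores into the function's own
      frame on top of a carried footprint close (`decode_residue` below); a store into a window of the `List.range … map` part needs
      the owner's covering lemma (`vorbis_decode_packet_rest.covered_footprint`, S7's `Frame` lemmas).
-/
import Vorbis.Spec.All
namespace Vorbis.Spec.FootprintTest
open X86 X86.User Asan Vorbis Vorbis.Spec

set_option maxRecDepth 4000

/-- Inline `% 2 ^ 32` of a register inside `shadowSpan`: setup_malloc. -/
example (others : List Obj) (frames : List (Nat × FrameLayout)) (A : Arena) (u : State) (v : Nat) (a : Word)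
    (hroom : 0x700000 + 80 ≤ (u.reg .rsp).toNat) (htop : (u.reg .rsp).toNat + 8 ≤ 0x800000)
    (ha : a.toNat + 1 < 2 ^ 64)
    (h1 : (u.reg .rdi).toNat + 128 ≤ a.toNat) (h2 : a.toNat + 1 ≤ (u.reg .rdi).toNat + 132) :
    Mem.SameExcept ((setup_malloc.spec others frames A).footprint u) u.mem
      ((u.mem.writeLE (u.reg .rsp - 8) 8 v).writeLE a 1 v) := by
  simp only [X86.User.Spec.footprint, vspec]
  u_same

/-- `r8 (… % 2 ^ 32)` inside `shadowSpan`, the store INTO the shadow window: setup_temp_malloc. -/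
example (others : List Obj) (frames : List (Nat × FrameLayout)) (A : Arena) (u : State) (v : Nat) (a : Word)
    (hroom : 0x700000 + 80 ≤ (u.reg .rsp).toNat) (htop : (u.reg .rsp).toNat + 8 ≤ 0x800000)
    (ha : a.toNat + 1 < 2 ^ 64)
    (h1 : (shadowSpan (A.B + (A.T - (r8 ((u.reg .rsi).toNat % 2 ^ 32) + 32)))
        (A.B + (A.T - (r8 ((u.reg .rsi).toNat % 2 ^ 32) + 32)) + (u.reg .rsi).toNat % 2 ^ 32)).lo ≤ a.toNat)
    (h2 : a.toNat + 1 ≤ (shadowSpan (A.B + (A.T - (r8 ((u.reg .rsi).toNat % 2 ^ 32) + 32)))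
        (A.B + (A.T - (r8 ((u.reg .rsi).toNat % 2 ^ 32) + 32)) + (u.reg .rsi).toNat % 2 ^ 32)).hi) :
    Mem.SameExcept ((setup_temp_malloc.spec others frames A).footprint u) u.mem
      ((u.mem.writeLE (u.reg .rsp - 8) 8 v).writeLE a 1 v) := by
  simp only [X86.User.Spec.footprint, vspec]
  u_same

/-- `(argInt r).toNat` (`argInt` is an `abbrev`): getn. -/
example (others : List Obj) (frames : List (Nat × FrameLayout)) (Blk : Block → Prop) (len : Nat) (u : State) (v : Nat) (a : Word)
    (hroom : 0x700000 + 128 ≤ (u.reg .rsp).toNat) (htop : (u.reg .rsp).toNat + 8 ≤ 0x800000)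
    (ha : a.toNat + 1 < 2 ^ 64)
    (h1 : (u.reg .rsi).toNat ≤ a.toNat) (h2 : a.toNat + 1 ≤ (u.reg .rsi).toNat + (argInt (u.reg .rdx)).toNat) :
    Mem.SameExcept ((getn.spec others frames Blk len).footprint u) u.mem
      ((u.mem.writeLE (u.reg .rsp - 8) 8 v).writeLE a 1 v) := by
  simp only [X86.User.Spec.footprint, vspec]
  u_same

/-- `argU32` twice in one window: residue_decode. -/
example (others : List Obj) (frames : List (Nat × FrameLayout)) (Blk : Block → Prop) (len : Nat) (u : State) (v : Nat) (a : Word)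
    (hroom : 0x700000 + 592 ≤ (u.reg .rsp).toNat) (htop : (u.reg .rsp).toNat + 8 ≤ 0x800000)
    (ha : a.toNat + 4 < 2 ^ 64)
    (h1 : (u.reg .rdx).toNat + 4 * argU32 (u.reg .rcx) ≤ a.toNat)
    (h2 : a.toNat + 4 ≤ (u.reg .rdx).toNat + 4 * argU32 (u.reg .rcx) + 4 * argU32 (u.reg .r8)) :
    Mem.SameExcept ((residue_decode.spec others frames Blk len).footprint u) u.mem
      ((u.mem.writeLE (u.reg .rsp - 8) 8 v).writeLE a 4 v) := by
  simp only [X86.User.Spec.footprint, vspec]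
  u_same

/-- Ghost functions of the memory (`decodeLen`, `stepBytes`) of `argInt` / `argU32`: codebook_decode_step. -/
example (others : List Obj) (frames : List (Nat × FrameLayout)) (Blk : Block → Prop) (len : Nat) (u : State) (v : Nat) (a : Word)
    (hroom : 0x700000 + 512 ≤ (u.reg .rsp).toNat) (htop : (u.reg .rsp).toNat + 8 ≤ 0x800000)
    (ha : a.toNat + 4 < 2 ^ 64)
    (h1 : (u.reg .rdx).toNat ≤ a.toNat)
    (h2 : a.toNat + 4 ≤ (u.reg .rdx).toNat +
      stepBytes (decodeLen u.mem (u.reg .rsi).toNat (argInt (u.reg .rcx))) (argU32 (u.reg .r8))) :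
    Mem.SameExcept ((codebook_decode_step.spec others frames Blk len).footprint u) u.mem
      ((u.mem.writeLE (u.reg .rsp - 8) 8 v).writeLE a 4 v) := by
  simp only [X86.User.Spec.footprint, vspec]
  u_same

/-- `.toNat` of the SIGNED value of a register, and `min` of two of them: draw_line. -/
example (others : List Obj) (frames : List (Nat × FrameLayout)) (u : State) (v : Nat) (a : Word)
    (hroom : 0x700000 + 112 ≤ (u.reg .rsp).toNat) (htop : (u.reg .rsp).toNat + 8 ≤ 0x800000)
    (ha : a.toNat + 4 < 2 ^ 64)
    (h1 : (u.reg .rdi).toNat + 4 * (s32 (u.reg .rsi)).toNat ≤ a.toNat)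
    (h2 : a.toNat + 4 ≤ (u.reg .rdi).toNat + 4 * (min (s32 (u.reg .rcx)) (s32 (u.reg .r9))).toNat) :
    Mem.SameExcept ((draw_line.spec others frames).footprint u) u.mem
      ((u.mem.writeLE (u.reg .rsp - 8) 8 v).writeLE a 4 v) := by
  simp only [X86.User.Spec.footprint, vspec]
  u_same

/-- `(s32 r / 2).toNat` (integer division of a signed value): do_floor. -/
example (others : List Obj) (frames : List (Nat × FrameLayout)) (Blk : Block → Prop) (mi : Nat) (u : State) (v : Nat) (a : Word)
    (hroom : 0x700000 + 192 ≤ (u.reg .rsp).toNat) (htop : (u.reg .rsp).toNat + 8 ≤ 0x800000)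
    (ha : a.toNat + 4 < 2 ^ 64)
    (h1 : (u.reg .r8).toNat ≤ a.toNat) (h2 : a.toNat + 4 ≤ (u.reg .r8).toNat + 4 * (s32 (u.reg .rcx) / 2).toNat) :
    Mem.SameExcept ((do_floor.spec others frames Blk mi).footprint u) u.mem
      ((u.mem.writeLE (u.reg .rsp - 8) 8 v).writeLE a 4 v) := by
  simp only [X86.User.Spec.footprint, vspec]
  u_same

/-- `(s64 r).toNat` on both ends of a window: copy_frame. -/
example (others : List Obj) (frames : List (Nat × FrameLayout)) (u : State) (v : Nat) (a : Word)
    (hroom : 0x700000 + 112 ≤ (u.reg .rsp).toNat) (htop : (u.reg .rsp).toNat + 8 ≤ 0x800000)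
    (ha : a.toNat + 4 < 2 ^ 64)
    (h1 : (u.reg .rdi).toNat + 4 * (s64 (u.reg .rsi)).toNat ≤ a.toNat)
    (h2 : a.toNat + 4 ≤ (u.reg .rdi).toNat + 4 * (s64 (u.reg .rdx)).toNat) :
    Mem.SameExcept ((copy_frame.spec others frames).footprint u) u.mem
      ((u.mem.writeLE (u.reg .rsp - 8) 8 v).writeLE a 4 v) := by
  simp only [X86.User.Spec.footprint, vspec]
  u_same

/-- S8's irreducible `quarter` (unfolded by `quarter_def` of `vspec`), with a fact about `quarter u` in the context. -/
example (others : List Obj) (frames : List (Nat × FrameLayout)) (len i0 koff : Nat) (u : State) (v : Nat) (a : Word)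
    (hroom : 0x700000 + 96 ≤ (u.reg .rsp).toNat) (htop : (u.reg .rsp).toNat + 8 ≤ 0x800000)
    (ha : a.toNat + 4 < 2 ^ 64) (hq : koff + 8 * quarter u ≤ i0 + 1)
    (h1 : (u.reg .rsi).toNat + 4 * (i0 + 1 - 8 * quarter u) ≤ a.toNat)
    (h2 : a.toNat + 4 ≤ (u.reg .rsi).toNat + 4 * (i0 + 1)) :
    Mem.SameExcept ((imdct_step3_iter0_loop.spec others frames len i0 koff).footprint u) u.mem
      ((u.mem.writeLE (u.reg .rsp - 8) 8 v).writeLE a 4 v) := by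
  simp only [X86.User.Spec.footprint, vspec] at hq h1 ⊢
  u_same

/-- An `if` footprint, dense case: the case is given to the simp call (`if_pos`). -/
example (others : List Obj) (frames : List (Nat × FrameLayout)) (u : State) (v : Nat) (a : Word)
    (hroom : 0x700000 + 96 ≤ (u.reg .rsp).toNat) (htop : (u.reg .rsp).toNat + 8 ≤ 0x800000)
    (ha : a.toNat + 4 < 2 ^ 64) (h : Codebook.sparse u.mem (u.reg .rdi).toNat = 0)
    (h1 : (add_entry.denseCell u).span.lo ≤ a.toNat) (h2 : a.toNat + 4 ≤ (add_entry.denseCell u).span.hi) :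
    Mem.SameExcept ((add_entry.spec others frames).footprint u) u.mem
      ((u.mem.writeLE (u.reg .rsp - 8) 8 v).writeLE a 4 v) := by
  simp only [X86.User.Spec.footprint, vspec, if_pos h]
  u_same

/-- An `if` footprint, sparse case, through S3's per-case lemma. -/
example (others : List Obj) (frames : List (Nat × FrameLayout)) (u : State) (v : Nat) (a : Word)
    (hroom : 0x700000 + 96 ≤ (u.reg .rsp).toNat) (htop : (u.reg .rsp).toNat + 8 ≤ 0x800000)
    (ha : a.toNat + 1 < 2 ^ 64) (h : Codebook.sparse u.mem (u.reg .rdi).toNat ≠ 0)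
    (h1 : (add_entry.lenCell u).span.lo ≤ a.toNat) (h2 : a.toNat + 1 ≤ (add_entry.lenCell u).span.hi) :
    Mem.SameExcept ((add_entry.spec others frames).footprint u) u.mem
      ((u.mem.writeLE (u.reg .rsp - 8) 8 v).writeLE a 1 v) := by
  unfold X86.User.Spec.footprint
  rw [add_entry.spec_writes_sparse others frames u h]
  simp only [vspec]
  u_same

/-- A footprint that is NOT a literal list (`… ++ (List.range n).map …`), in the SEGMENT shape: the footprint so far is carried
(`hsame`, the `same` field of a cut point's assertion), the segment adds stores into the function's own frame. -/
example (len : Nat) (A : Arena) (others : List Obj) (frames : List (Nat × FrameLayout)) (stored room : Int) (ysz : Nat → Nat) (u : State)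
    (v : Nat) (w : Mem)
    (hroom : 0x700000 + 848 ≤ (u.reg .rsp).toNat) (htop : (u.reg .rsp).toNat + 8 ≤ 0x800000)
    (hsame : Mem.SameExcept ((decode_residue.spec len A others frames stored room ysz).footprint u) u.mem w) :
    Mem.SameExcept ((decode_residue.spec len A others frames stored room ysz).footprint u) u.mem
      ((w.writeLE (u.reg .rsp - 8) 8 v).writeLE (u.reg .rsp - 16) 8 v) := by
  simp only [X86.User.Spec.footprint, vspec] at hsame ⊢
  u_same

/-- `StartDecoder.spec g` (the `Spec` of the ghosts of an activation: an `abbrev`, so that `vspec` sees through it), in the shape of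
the LAST segment's `Returned`: the footprint so far is carried as `StartDecoder.footprint g` (`Frame.same`), which is the same list. -/
example (g : StartDecoder.Ghost) (v : Nat) (w : Mem)
    (hroom : 0x700000 + 1888 ≤ (g.e.reg .rsp).toNat) (htop : (g.e.reg .rsp).toNat + 8 ≤ 0x800000)
    (hsame : Mem.SameExcept (StartDecoder.footprint g) g.e.mem w) :
    Mem.SameExcept ((StartDecoder.spec g).footprint g.e) g.e.mem
      ((w.writeLE (g.e.reg .rsp - 8) 8 v).writeLE (g.e.reg .rsp - 16) 8 v) := by
  simp only [X86.User.Spec.footprint, vspec]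
  simp only [StartDecoder.footprint, StartDecoder.Ghost.RA, StartDecoder.depth] at hsame
  u_same

end Vorbis.Spec.FootprintTest
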